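-- pv_equiv track=rewrite | github.com/raymondw99/DD1331 | Lab 3/languages.py | robbers_convert
-- ===== SOURCE A (Python) =====
-- consonants = "bcdfghjklmnpqrstvwxzBCDFGHJKLMNPQRSTVWXZ"
--
-- def robbers_convert(regular):
--     robber = ""
--     for word in regular:
--         if word.lower() in consonants:
--             robber = robber + word + "o" + word.lower()
--         else:
--             robber = robber + word
--     return robber
-- ===== SOURCE B (Python) =====
-- consonants = "bcdfghjklmnpqrstvwxzBCDFGHJKLMNPQRSTVWXZ"
--
-- _TABLE = {ord(c): c + "o" + c.lower() for c in consonants}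
--
-- def robbers_convert(regular):
--     return regular.translate(_TABLE)
-- ===== Notes on version B (the rewrite author's own statement) =====
-- stated objective: idiomatic
-- what changed: Replaces the explicit character loop with repeated string concatenation and a substring membership test by a translation table built once (ord(c) -> c+'o'+c.lower()) and a single str.translate call.
import Mathlib
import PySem

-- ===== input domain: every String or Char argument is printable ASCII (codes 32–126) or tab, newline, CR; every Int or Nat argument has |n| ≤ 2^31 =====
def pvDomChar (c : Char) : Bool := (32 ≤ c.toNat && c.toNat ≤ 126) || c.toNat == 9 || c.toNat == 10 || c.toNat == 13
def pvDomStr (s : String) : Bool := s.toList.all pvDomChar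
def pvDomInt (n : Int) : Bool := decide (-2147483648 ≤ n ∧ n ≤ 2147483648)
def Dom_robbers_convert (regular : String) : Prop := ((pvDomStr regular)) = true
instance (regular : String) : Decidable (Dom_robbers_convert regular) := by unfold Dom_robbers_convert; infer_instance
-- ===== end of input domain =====

set_option maxRecDepth 10000


-- B replaces A's per-character loop (substring test + string concatenation) by a translation
-- table built once and one table-driven pass (str.translate); idiomatic, same results.

-- ===== PORT A =====
-- the module constant, as a character list (port works on code points; exact for these ASCII strings)
def pvConsonants : List Char := "bcdfghjklmnpqrstvwxzBCDFGHJKLMNPQRSTVWXZ".toList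

def robbers_convert (regular : String) : String :=
  String.ofList (regular.toList.foldl
    (fun robber w =>
      if PySem.Chars.isIn [PySem.Chars.lowerChar w] pvConsonants then
        robber ++ [w, 'o', PySem.Chars.lowerChar w]
      else
        robber ++ [w])
    [])

-- ===== PORT B =====
-- the translation table of Source B; Python keys it by ord(c), here the code point is the Char itself
def pvTable : PySem.Dict Char (List Char) :=
  pvConsonants.foldl (fun d c => d.insert c [c, 'o', PySem.Chars.lowerChar c]) (PySem.Dict.mk [])

-- str.translate: each character is replaced by its table entry, absent characters stay
def robbers_convert_alt (regular : String) : String :=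
  String.ofList (regular.toList.flatMap (fun c => pvTable.getD c [c]))

-- ===== PRECONDITION & SPEC =====
def Spec_robbers_convert (regular : String) (out : String) : Prop := out = robbers_convert_alt regular
instance (regular : String) (out : String) : Decidable (Spec_robbers_convert regular out) := by unfold Spec_robbers_convert; infer_instance

-- ===== CLAIM (what is proved, stated in full; the proofs are below) =====
def Claim_equal_robbers_convert : Prop := ∀ (regular : String), Dom_robbers_convert regular → Spec_robbers_convert regular (robbers_convert regular)

-- ===== LEMMAS AND PROOFS =====

-- A's per-character contribution
def pvStepA (w : Char) : List Char :=
  if PySem.Chars.isIn [PySem.Chars.lowerChar w] pvConsonants then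
    [w, 'o', PySem.Chars.lowerChar w]
  else [w]

-- on every character of the domain the two per-character translations agree (checked by decide
-- after reducing the Char to its code point)
theorem pvStep_agree_nat : ∀ n : Nat, n < 127 →
    pvStepA (Char.ofNat n) = pvTable.getD (Char.ofNat n) [Char.ofNat n] := by decide

theorem pvStep_agree (c : Char) (h : pvDomChar c = true) :
    pvStepA c = pvTable.getD c [c] := by
  have hle : c.toNat < 127 := by
    simp only [pvDomChar, Bool.or_eq_true, Bool.and_eq_true, decide_eq_true_eq,
      beq_iff_eq, Nat.le_iff_lt_or_eq] at h
    omega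
  have := pvStep_agree_nat c.toNat hle
  rwa [Char.ofNat_toNat] at this

-- ===== VERDICT (by name: the statement is the Claim_ definition above) =====
theorem robbers_convert_spec : Claim_equal_robbers_convert := by
  intro regular hdom
  unfold Spec_robbers_convert robbers_convert robbers_convert_alt
  have hstep : (regular.toList.foldl
      (fun robber w =>
        if PySem.Chars.isIn [PySem.Chars.lowerChar w] pvConsonants then
          robber ++ [w, 'o', PySem.Chars.lowerChar w]
        else robber ++ [w]) [])
      = regular.toList.flatMap pvStepA := by
    have : (fun (robber : List Char) (w : Char) =>
        if PySem.Chars.isIn [PySem.Chars.lowerChar w] pvConsonants then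
          robber ++ [w, 'o', PySem.Chars.lowerChar w]
        else robber ++ [w]) = fun robber w => robber ++ pvStepA w := by
      funext robber w
      unfold pvStepA
      split <;> rfl
    rw [this, PySem.List.foldl_append_eq_flatMap]
    simp
  rw [hstep]
  congr 1
  apply List.flatMap_congr
  intro c hc
  apply pvStep_agree
  have := hdom
  unfold Dom_robbers_convert pvDomStr at this
  simp [List.all_eq_true] at this
  exact this c hc
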